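-- pv_equiv track=rewrite | github.com/Giraffe-Conservation-Foundation/streamlit | test_bucket_parsing.py | extract_countries_sites_from_buckets
-- ===== SOURCE A (Python) =====
-- def extract_countries_sites_from_buckets(bucket_names):
--     """Extract country and site combinations from bucket names following gcf_country_site pattern"""
--     countries_sites = {}
--
--     for bucket_name in bucket_names:
--         # Check if bucket follows the gcf_country_site pattern
--         if bucket_name.lower().startswith('gcf'):
--             parts = bucket_name.lower().split('_')
--             # Expected pattern: gcf_country_site or variations with separators
--             if len(parts) >= 3:
--                 # Extract country and site from bucket name
--                 country = parts[1].upper()  # Convert to uppercase for consistency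
--                 site = parts[2].upper()     # Convert to uppercase for consistency
--
--                 # Add to countries_sites dictionary
--                 if country not in countries_sites:
--                     countries_sites[country] = []
--
--                 if site not in countries_sites[country]:
--                     countries_sites[country].append(site)
--
--             # Also handle patterns with dashes (gcf-country-site)
--             elif '-' in bucket_name:
--                 parts = bucket_name.lower().split('-')
--                 if len(parts) >= 3:
--                     country = parts[1].upper()
--                     site = parts[2].upper()
--
--                     if country not in countries_sites:
--                         countries_sites[country] = []
--
--                     if site not in countries_sites[country]:
--                         countries_sites[country].append(site)
--
--     # Sort countries and sites for consistent display
--     for country in countries_sites: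
--         countries_sites[country].sort()
--
--     return countries_sites
-- ===== SOURCE B (Python) =====
-- def extract_countries_sites_from_buckets(bucket_names):
--     """Extract country and site combinations from bucket names (gcf_country_site pattern)."""
--     def parse(name):
--         low = name.lower()
--         if not low.startswith('gcf'):
--             return None
--         parts = low.split('_')
--         if len(parts) >= 3:
--             return parts[1].upper(), parts[2].upper()
--         if '-' in name:
--             parts = low.split('-')
--             if len(parts) >= 3:
--                 return parts[1].upper(), parts[2].upper()
--         return None
--
--     pairs = [p for p in map(parse, bucket_names) if p is not None]
--     countries = list(dict.fromkeys(c for c, _ in pairs))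
--     return {c: sorted({s for c2, s in pairs if c2 == c}) for c in countries}
-- ===== Notes on version B (the rewrite author's own statement) =====
-- stated objective: alternative
-- what changed: A builds a country->sites dict incrementally while iterating buckets, with membership-checked appends and a final in-place sort pass over the keys; B builds no dict at all: it parses every bucket into an optional (country, site) pair, takes the ordered distinct countries of the flat pair list once, and constructs the result directly with one per-country rescan of that list (filter, set, sorted).
import Mathlib
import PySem

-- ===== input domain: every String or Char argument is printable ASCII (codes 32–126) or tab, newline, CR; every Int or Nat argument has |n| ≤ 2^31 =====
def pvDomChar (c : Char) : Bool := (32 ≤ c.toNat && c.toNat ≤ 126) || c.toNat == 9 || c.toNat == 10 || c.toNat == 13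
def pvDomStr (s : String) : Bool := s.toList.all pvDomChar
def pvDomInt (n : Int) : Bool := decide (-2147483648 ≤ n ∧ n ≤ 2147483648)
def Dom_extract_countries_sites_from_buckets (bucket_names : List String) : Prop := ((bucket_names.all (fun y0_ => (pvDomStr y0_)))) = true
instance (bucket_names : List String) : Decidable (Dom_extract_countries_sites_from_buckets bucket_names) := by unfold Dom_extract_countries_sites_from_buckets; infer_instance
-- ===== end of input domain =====

-- B builds no dict at all: it parses every bucket into an optional (country, site) pair, takes the
-- ordered distinct countries of the flat pair list once, and builds the result with one per-country
-- rescan of that list (filter, set, sorted) — an alternative decomposition vs A's incremental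
-- membership-checked dict building plus in-place sort pass.


-- ===== PORT A =====
def extract_countries_sites_from_buckets (bucket_names : List String) : List (String × List String) :=
  let countries_sites : PySem.Dict String (List String) :=
    bucket_names.foldl (fun countries_sites bucket_name =>
      if PySem.Str.startswith (PySem.Str.lower bucket_name) "gcf" then
        let parts := (PySem.Str.split? (PySem.Str.lower bucket_name) "_").getD []
        if 3 ≤ parts.length then
          let country := PySem.Str.upper (PySem.List.pyGetD parts 1 "")
          let site := PySem.Str.upper (PySem.List.pyGetD parts 2 "")
          let cs1 := if countries_sites.contains country then countries_sites
                     else countries_sites.insert country []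
          let lst := cs1.getD country []
          if lst.contains site then cs1 else cs1.insert country (lst ++ [site])
        else if PySem.Str.isIn "-" bucket_name then
          let parts := (PySem.Str.split? (PySem.Str.lower bucket_name) "-").getD []
          if 3 ≤ parts.length then
            let country := PySem.Str.upper (PySem.List.pyGetD parts 1 "")
            let site := PySem.Str.upper (PySem.List.pyGetD parts 2 "")
            let cs1 := if countries_sites.contains country then countries_sites
                       else countries_sites.insert country []
            let lst := cs1.getD country []
            if lst.contains site then cs1 else cs1.insert country (lst ++ [site])
          else countries_sites
        else countries_sites
      else countries_sites) PySem.Dict.empty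
  -- for country in countries_sites: countries_sites[country].sort()
  let sorted := countries_sites.keys.foldl
    (fun cs country => cs.modify country [] (fun v => PySem.List.sorted v (fun x => x) false))
    countries_sites
  sorted.items

-- ===== PORT B =====
def pvParseBucket (name : String) : Option (String × String) :=
  let low := PySem.Str.lower name
  if ¬ (PySem.Str.startswith low "gcf") then none
  else
    let parts := (PySem.Str.split? low "_").getD []
    if 3 ≤ parts.length then
      some (PySem.Str.upper (PySem.List.pyGetD parts 1 ""), PySem.Str.upper (PySem.List.pyGetD parts 2 ""))
    else if PySem.Str.isIn "-" name then
      let parts2 := (PySem.Str.split? low "-").getD []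
      if 3 ≤ parts2.length then
        some (PySem.Str.upper (PySem.List.pyGetD parts2 1 ""), PySem.Str.upper (PySem.List.pyGetD parts2 2 ""))
      else none
    else none

def extract_countries_sites_from_buckets_alt (bucket_names : List String) : List (String × List String) :=
  let pairs := bucket_names.filterMap pvParseBucket
  let countries := PySem.List.dedup (pairs.map Prod.fst)   -- list(dict.fromkeys(...))
  countries.map (fun c =>
    (c, PySem.List.sorted
          (PySem.Set.ofList ((pairs.filter (fun p => p.1 == c)).map Prod.snd))  -- {s for c2, s in pairs if c2 == c}
          (fun x => x) false))

-- ===== PRECONDITION & SPEC =====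
def Spec_extract_countries_sites_from_buckets (bucket_names : List String) (out : List (String × List String)) : Prop := out = extract_countries_sites_from_buckets_alt bucket_names
instance (bucket_names : List String) (out : List (String × List String)) : Decidable (Spec_extract_countries_sites_from_buckets bucket_names out) := by unfold Spec_extract_countries_sites_from_buckets; infer_instance

-- ===== CLAIM (what is proved, stated in full; the proofs are below) =====
def Claim_equal_extract_countries_sites_from_buckets : Prop := ∀ (bucket_names : List String), Dom_extract_countries_sites_from_buckets bucket_names → Spec_extract_countries_sites_from_buckets bucket_names (extract_countries_sites_from_buckets bucket_names)

-- ===== LEMMAS AND PROOFS =====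

-- A's duplicated insertion code, abstracted for the proofs.
def pvStepA (d : PySem.Dict String (List String)) (c s : String) : PySem.Dict String (List String) :=
  let cs1 := if d.contains c then d else d.insert c []
  let lst := cs1.getD c []
  if lst.contains s then cs1 else cs1.insert c (lst ++ [s])

-- the ordered distinct countries of a pair list
def pvKeysOf (ps : List (String × String)) : List String := PySem.Set.ofList (ps.map Prod.fst)

-- the distinct sites of country c, in first-occurrence order
def pvSitesOf (ps : List (String × String)) (c : String) : List String :=
  PySem.Set.ofList ((ps.filter (fun p => p.1 == c)).map Prod.snd)

-- the association list A's first loop builds, characterised from the pair list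
def pvModel (ps : List (String × String)) : List (String × List String) :=
  (pvKeysOf ps).map (fun c => (c, pvSitesOf ps c))

theorem pvOfList_append_singleton (l : List String) (x : String) :
    PySem.Set.ofList (l ++ [x]) =
      if x ∈ l then PySem.Set.ofList l else PySem.Set.ofList l ++ [x] := by
  rw [PySem.Set.ofList_eq_foldl, List.foldl_append]
  rw [← PySem.Set.ofList_eq_foldl]
  simp only [List.foldl_cons, List.foldl_nil, PySem.Set.add]
  by_cases h : x ∈ l <;> simp [h]

theorem pvModel_keys (ps : List (String × String)) :
    (pvModel ps).map Prod.fst = pvKeysOf ps := by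
  unfold pvModel
  rw [List.map_map]
  simp [Function.comp_def]

theorem pvAstep_eq (d : PySem.Dict String (List String)) (name : String) :
    (if PySem.Str.startswith (PySem.Str.lower name) "gcf" then
        let parts := (PySem.Str.split? (PySem.Str.lower name) "_").getD []
        if 3 ≤ parts.length then
          let country := PySem.Str.upper (PySem.List.pyGetD parts 1 "")
          let site := PySem.Str.upper (PySem.List.pyGetD parts 2 "")
          let cs1 := if d.contains country then d else d.insert country []
          let lst := cs1.getD country []
          if lst.contains site then cs1 else cs1.insert country (lst ++ [site])
        else if PySem.Str.isIn "-" name then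
          let parts := (PySem.Str.split? (PySem.Str.lower name) "-").getD []
          if 3 ≤ parts.length then
            let country := PySem.Str.upper (PySem.List.pyGetD parts 1 "")
            let site := PySem.Str.upper (PySem.List.pyGetD parts 2 "")
            let cs1 := if d.contains country then d else d.insert country []
            let lst := cs1.getD country []
            if lst.contains site then cs1 else cs1.insert country (lst ++ [site])
          else d
        else d
      else d)
    = match pvParseBucket name with
      | some p => pvStepA d p.1 p.2
      | none => d := by
  by_cases h1 : PySem.Chars.startswith (PySem.Chars.lower name.toList) ['g', 'c', 'f'] = true
  · by_cases h2 : 3 ≤ ((PySem.Str.split? (PySem.Str.lower name) "_").getD []).length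
    · simp [pvParseBucket, pvStepA, h1, h2]
    · by_cases h3 : PySem.Chars.isIn ['-'] name.toList = true
      · by_cases h4 : 3 ≤ ((PySem.Str.split? (PySem.Str.lower name) "-").getD []).length
        · simp [pvParseBucket, pvStepA, h1, h2, h3, h4]
        · simp [pvParseBucket, h1, h2, h3, h4]
      · simp [pvParseBucket, h1, h2, h3]
  · simp [pvParseBucket, h1]

theorem pvFold_filterMap (l : List String) (d : PySem.Dict String (List String)) :
    l.foldl (fun x y => match pvParseBucket y with
      | some p => pvStepA x p.1 p.2
      | none => x) d
    = (l.filterMap pvParseBucket).foldl (fun d p => pvStepA d p.1 p.2) d := by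
  induction l generalizing d with
  | nil => rfl
  | cons a t ih =>
    simp only [List.foldl_cons, List.filterMap_cons]
    cases pvParseBucket a with
    | none => exact ih d
    | some p => simp only [List.foldl_cons]; exact ih _

theorem pvFoldA_items (ps : List (String × String)) :
    (ps.foldl (fun d p => pvStepA d p.1 p.2) PySem.Dict.empty).items = pvModel ps := by
  induction ps using List.reverseRecOn with
  | nil => rfl
  | append_singleton ps p ih =>
    rw [List.foldl_append, List.foldl_cons, List.foldl_nil]
    set D := ps.foldl (fun d p => pvStepA d p.1 p.2) PySem.Dict.empty with hDdef
    have hK : D.keys = pvKeysOf ps := by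
      show D.items.map Prod.fst = _
      rw [ih, pvModel_keys]
    have hnd : D.keys.Nodup := by rw [hK]; exact PySem.Set.nodup_ofList _
    have hKeys' : pvKeysOf (ps ++ [p]) =
        if p.1 ∈ ps.map Prod.fst then pvKeysOf ps else pvKeysOf ps ++ [p.1] := by
      unfold pvKeysOf
      rw [List.map_append, List.map_singleton, pvOfList_append_singleton]
    have hfilt : ∀ c, List.filter (fun q => q.1 == c) (ps ++ [p])
        = List.filter (fun q => q.1 == c) ps ++ (if (p.1 == c) = true then [p] else []) := by
      intro c
      rw [List.filter_append, List.filter_singleton]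
      by_cases hc : (p.1 == c) = true <;> simp [hc]
    have hSites_ne : ∀ c, (p.1 == c) = false → pvSitesOf (ps ++ [p]) c = pvSitesOf ps c := by
      intro c hc
      unfold pvSitesOf
      rw [hfilt c, if_neg (by simp [hc])]
      simp
    have hSites_eq : pvSitesOf (ps ++ [p]) p.1 =
        if p.2 ∈ (ps.filter (fun q => q.1 == p.1)).map Prod.snd
        then pvSitesOf ps p.1 else pvSitesOf ps p.1 ++ [p.2] := by
      unfold pvSitesOf
      rw [hfilt p.1, if_pos (beq_self_eq_true p.1), List.map_append, List.map_singleton,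
        pvOfList_append_singleton]
    have hmemK : p.1 ∈ pvKeysOf ps ↔ p.1 ∈ ps.map Prod.fst := by
      unfold pvKeysOf; exact PySem.Set.mem_ofList _ _
    unfold pvStepA
    by_cases hc : p.1 ∈ ps.map Prod.fst
    · -- country already present
      have hck : p.1 ∈ D.keys := by rw [hK]; exact hmemK.mpr hc
      have hcon : D.contains p.1 = true := (PySem.Dict.contains_iff_mem_keys D p.1).mpr hck
      have hmemit : (p.1, pvSitesOf ps p.1) ∈ D.items := by
        rw [ih]
        exact List.mem_map.mpr ⟨p.1, hmemK.mpr hc, rfl⟩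
      have hget : D.get? p.1 = some (pvSitesOf ps p.1) :=
        PySem.Dict.get?_of_mem_items D hmemit hnd
      have hgd : D.getD p.1 [] = pvSitesOf ps p.1 := by
        rw [PySem.Dict.getD_eq_get?_getD, hget]; rfl
      have hsin : (pvSitesOf ps p.1).contains p.2
          = decide (p.2 ∈ (ps.filter (fun q => q.1 == p.1)).map Prod.snd) := by
        unfold pvSitesOf
        simp [PySem.Set.mem_ofList]
      simp only [hcon, if_true, hgd]
      by_cases hs : p.2 ∈ (ps.filter (fun q => q.1 == p.1)).map Prod.snd
      · -- duplicate site: nothing changes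
        rw [hsin]
        simp only [hs, decide_true, if_true]
        rw [ih]
        unfold pvModel
        rw [hKeys', if_pos hc]
        apply List.map_congr_left
        intro c hcK
        by_cases hcc : (p.1 == c) = true
        · have hc1 : c = p.1 := (eq_of_beq hcc).symm
          subst hc1
          rw [hSites_eq, if_pos hs]
        · rw [hSites_ne c (by simpa using hcc)]
      · -- new site appended
        rw [hsin]
        simp only [hs, decide_false, Bool.false_eq_true, if_false]
        rw [PySem.Dict.items_insert_of_contains D _ hcon, ih]
        unfold pvModel
        rw [hKeys', if_pos hc, List.map_map]
        apply List.map_congr_left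
        intro c hcK
        by_cases hcc : (p.1 == c) = true
        · have hc1 : c = p.1 := (eq_of_beq hcc).symm
          subst hc1
          simp only [Function.comp_apply, beq_self_eq_true, if_true]
          rw [hSites_eq, if_neg hs]
        · have hccs : (c == p.1) = false := by
            by_contra h
            have h' : c = p.1 := eq_of_beq (by simpa using h)
            exact hcc (by rw [h']; exact beq_self_eq_true p.1)
          simp only [Function.comp_apply, hccs, Bool.false_eq_true, if_false]
          rw [hSites_ne c (by simpa using hcc)]
    · -- new country
      have hcon : D.contains p.1 = false := by
        by_contra h
        have := (PySem.Dict.contains_iff_mem_keys D p.1).mp (by simpa using h)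
        rw [hK] at this
        exact hc (hmemK.mp this)
      simp only [hcon, Bool.false_eq_true, if_false]
      have hgd : ((D.insert p.1 []).getD p.1 []) = ([] : List String) := by
        rw [PySem.Dict.getD_eq_get?_getD, PySem.Dict.get?_insert_self]; rfl
      simp only [hgd, List.contains_nil, Bool.false_eq_true, if_false, List.nil_append]
      have hnoc : ∀ q ∈ D.items, (q.1 == p.1) = false := by
        intro q hq
        by_contra h
        have hq1 : q.1 ∈ D.keys := PySem.Dict.mem_keys_of_mem_items D hq
        rw [hK] at hq1
        have h' : q.1 = p.1 := by simpa using h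
        rw [h'] at hq1
        exact hc (hmemK.mp hq1)
      rw [PySem.Dict.items_insert_of_contains _ _ (PySem.Dict.contains_insert_self D p.1 []),
        PySem.Dict.items_insert_of_not_contains D _ hcon, List.map_append, List.map_singleton]
      have hfilt0 : List.filter (fun q => q.1 == p.1) ps = [] := by
        rw [List.filter_eq_nil_iff]
        intro q hq
        by_contra h
        have h' : q.1 = p.1 := eq_of_beq (by simpa using h)
        exact hc (by rw [← h']; exact List.mem_map_of_mem hq)
      have hlast : pvSitesOf (ps ++ [p]) p.1 = [p.2] := by
        unfold pvSitesOf
        rw [hfilt p.1, if_pos (beq_self_eq_true p.1), hfilt0]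
        simp [PySem.Set.ofList_eq_foldl, PySem.Set.add]
      unfold pvModel
      rw [hKeys', if_neg hc, List.map_append, List.map_singleton, hlast]
      congr 1
      · have hmap : D.items.map (fun q => if (q.1 == p.1) = true then (p.1, [p.2]) else q)
            = D.items := by
          conv_rhs => rw [← List.map_id D.items]
          apply List.map_congr_left
          intro q hq
          simp [hnoc q hq]
        rw [hmap, ih]
        unfold pvModel
        apply List.map_congr_left
        intro c hcK
        have hcc : (p.1 == c) = false := by
          by_contra h
          have h' : p.1 = c := by simpa using h
          have hcK' : c ∈ ps.map Prod.fst := (PySem.Set.mem_ofList _ _).mp hcK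
          rw [h'] at hc
          exact hc hcK'
        rw [hSites_ne c hcc]
      · simp

-- sorting pass: modify every key with f
theorem pvSortLoop (ks : List String) (d : PySem.Dict String (List String))
    (f : List String → List String)
    (hks : ks.Nodup) (hsub : ∀ k ∈ ks, d.contains k = true) (hnd : d.keys.Nodup) :
    (ks.foldl (fun cs k => cs.modify k [] f) d).items
      = d.items.map (fun q => if q.1 ∈ ks then (q.1, f q.2) else q) := by
  induction ks generalizing d with
  | nil => simp
  | cons k t ih =>
    simp only [List.foldl_cons]
    have hk : d.contains k = true := hsub k (by simp)
    have hkt : k ∉ t := (List.nodup_cons.mp hks).1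
    have ht : t.Nodup := (List.nodup_cons.mp hks).2
    have hitems : (d.modify k [] f).items
        = d.items.map (fun q => if q.1 = k then (q.1, f q.2) else q) := by
      rw [PySem.Dict.modify, PySem.Dict.items_insert_of_contains d _ hk]
      apply List.map_congr_left
      intro p hp
      by_cases hpk : (p.1 == k) = true
      · have h1 := PySem.Dict.get?_of_mem_items d (k := p.1) (v := p.2) (by simpa using hp) hnd
        have h2 : d.getD k [] = p.2 := by
          rw [PySem.Dict.getD_eq_get?_getD, ← eq_of_beq hpk, h1]; rfl
        simp [eq_of_beq hpk, h2]
      · simp [hpk, (by simpa using hpk : ¬ p.1 = k)]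
    have hkeys : (d.modify k [] f).keys = d.keys := by
      rw [PySem.Dict.modify, PySem.Dict.keys_insert_of_contains d _ hk]
    have hnd' : (d.modify k [] f).keys.Nodup := by rw [hkeys]; exact hnd
    have hsub' : ∀ x ∈ t, (d.modify k [] f).contains x = true := by
      intro x hx
      rw [PySem.Dict.contains_iff_mem_keys, hkeys, ← PySem.Dict.contains_iff_mem_keys]
      exact hsub x (by simp [hx])
    rw [ih _ ht hsub' hnd', hitems, List.map_map]
    apply List.map_congr_left
    intro p hp
    by_cases hpk : p.1 = k
    · simp [Function.comp, hpk, hkt]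
    · simp [Function.comp, hpk]

-- ===== VERDICT (by name: the statement is the Claim_ definition above) =====
theorem extract_countries_sites_from_buckets_spec : Claim_equal_extract_countries_sites_from_buckets := by
  intro bucket_names _
  unfold Spec_extract_countries_sites_from_buckets
  unfold extract_countries_sites_from_buckets extract_countries_sites_from_buckets_alt
  simp only []
  rw [List.foldl_ext _
    (fun x y => match pvParseBucket y with
      | some p => pvStepA x p.1 p.2
      | none => x) PySem.Dict.empty
    (fun a b _ => pvAstep_eq a b)]
  rw [pvFold_filterMap]
  set ps := bucket_names.filterMap pvParseBucket with hps
  set D := ps.foldl (fun d p => pvStepA d p.1 p.2) PySem.Dict.empty with hD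
  have hitems : D.items = pvModel ps := pvFoldA_items ps
  have hK : D.keys = pvKeysOf ps := by
    show D.items.map Prod.fst = _
    rw [hitems, pvModel_keys]
  have hnd : D.keys.Nodup := by rw [hK]; exact PySem.Set.nodup_ofList _
  rw [pvSortLoop _ _ _ hnd (fun k hk => (PySem.Dict.contains_iff_mem_keys _ k).mpr hk) hnd]
  rw [hitems]
  unfold pvModel
  rw [List.map_map]
  simp only [PySem.List.dedup_eq_ofList]
  apply List.map_congr_left
  intro c hcK
  have : c ∈ D.keys := by rw [hK]; exact hcK
  simp [Function.comp, this, pvSitesOf]
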